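-- pv_equiv track=rewrite | github.com/tgkei/Algorithm_study | by_python/2020_summer_naver_hack/b.py | solution
-- ===== SOURCE A (Python) =====
-- def solution(id_list, k):
--     answer = 0
--     board = dict()
--
--     for each_id in id_list:
--         tmp = list(each_id.split())
--         today = set()
--         for each in tmp:
--             if each not in board:
--                 board[each] = 1
--                 today.add(each)
--                 answer+=1
--             elif board[each] < k and each not in today:
--                 board[each] +=1
--                 today.add(each)
--                 answer+=1
--
--     return answer
-- ===== SOURCE B (Python) =====
-- def solution(id_list, k):
--     counts = {}
--     for each_id in id_list:
--         for tok in set(each_id.split()):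
--             counts[tok] = counts.get(tok, 0) + 1
--     cap = k if k > 1 else 1
--     return sum(min(cap, c) for c in counts.values())
-- ===== Notes on version B (the rewrite author's own statement) =====
-- stated objective: simpler
-- what changed: Replaces the running per-token capped counter plus per-line seen-set with a count-then-aggregate structure: one pass builds a dict of distinct-line counts per token, then the answer is the sum of min(max(k,1), count).
import Mathlib
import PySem

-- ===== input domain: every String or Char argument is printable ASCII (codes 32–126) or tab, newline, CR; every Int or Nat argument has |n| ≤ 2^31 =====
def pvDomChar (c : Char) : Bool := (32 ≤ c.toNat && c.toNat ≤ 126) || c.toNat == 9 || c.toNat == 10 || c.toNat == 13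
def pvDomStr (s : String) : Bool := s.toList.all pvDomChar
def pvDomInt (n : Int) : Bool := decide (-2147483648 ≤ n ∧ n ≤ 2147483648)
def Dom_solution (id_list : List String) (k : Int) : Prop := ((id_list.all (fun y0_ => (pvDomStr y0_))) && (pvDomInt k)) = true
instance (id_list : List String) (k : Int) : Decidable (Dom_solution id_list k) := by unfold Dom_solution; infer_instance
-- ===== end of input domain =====

-- B replaces A's running per-token capped counter and per-line seen-set with a count-then-aggregate
-- structure (one dict of distinct-line counts per token, then sum the capped counts); same cost, simpler.

-- ===== PORT A =====
-- one step of A's inner loop over the tokens of a line; state = (answer, board, today)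
def stepA (k : Int) (s : Int × PySem.Dict String Int × PySem.Set String) (each : String) :
    Int × PySem.Dict String Int × PySem.Set String :=
  if s.2.1.contains each = false then
    (s.1 + 1, s.2.1.insert each 1, s.2.2.add each)
  else if s.2.1.getD each 0 < k ∧ s.2.2.contains each = false then
    -- board[each] cannot raise here: `each` is in board, so getD each 0 is the stored value
    (s.1 + 1, s.2.1.insert each (s.2.1.getD each 0 + 1), s.2.2.add each)
  else s

-- one iteration of A's outer loop: tmp = list(each_id.split()); today = set(); inner loop
def lineA (k : Int) (st : Int × PySem.Dict String Int) (each_id : String) :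
    Int × PySem.Dict String Int :=
  let tmp := PySem.Str.split₀ each_id
  let r := tmp.foldl (stepA k) (st.1, st.2, PySem.Set.empty)
  (r.1, r.2.1)

def solution (id_list : List String) (k : Int) : Int :=
  (id_list.foldl (lineA k) (0, PySem.Dict.empty)).1

-- ===== PORT B =====
-- counts[tok] = counts.get(tok, 0) + 1
def stepB (d : PySem.Dict String Int) (tok : String) : PySem.Dict String Int :=
  d.insert tok (d.getD tok 0 + 1)

-- for tok in set(each_id.split()): …   (the sum below does not depend on the set's order)
def lineB (d : PySem.Dict String Int) (each_id : String) : PySem.Dict String Int :=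
  (PySem.Set.ofList (PySem.Str.split₀ each_id)).foldl stepB d

def solution_alt (id_list : List String) (k : Int) : Int :=
  let counts := id_list.foldl lineB PySem.Dict.empty
  let cap := if 1 < k then k else 1
  (counts.values.map (fun c => min cap c)).sum

-- ===== PRECONDITION & SPEC =====
def Spec_solution (id_list : List String) (k : Int) (out : Int) : Prop := out = solution_alt id_list k
instance (id_list : List String) (k : Int) (out : Int) : Decidable (Spec_solution id_list k out) := by unfold Spec_solution; infer_instance

-- ===== CLAIM (what is proved, stated in full; the proofs are below) =====
def Claim_equal_solution : Prop := ∀ (id_list : List String) (k : Int), Dom_solution id_list k → Spec_solution id_list k (solution id_list k)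

-- ===== LEMMAS AND PROOFS =====

-- B's cap
def capOf (k : Int) : Int := if 1 < k then k else 1

-- B's counts dict after additionally processing the (multi)set of tokens p of the current line
def cOf (c0 : PySem.Dict String Int) (p : List String) : PySem.Dict String Int :=
  (PySem.Set.ofList p).foldl stepB c0

-- the coupling invariant between A's state (ans, b) and B's counts c
def CInv (k : Int) (c : PySem.Dict String Int) (ans : Int) (b : PySem.Dict String Int) : Prop :=
  b.keys = c.keys ∧ c.keys.Nodup ∧
  (∀ x, b.getD x 0 = min (capOf k) (c.getD x 0)) ∧
  (∀ x ∈ c.keys, 1 ≤ c.getD x 0) ∧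
  ans = (c.keys.map (fun y => min (capOf k) (c.getD y 0))).sum

-- characterisation of A's `today` set after the tokens p of the current line (c0 = counts at line start)
def Schar (k : Int) (c0 : PySem.Dict String Int) (S : PySem.Set String) (p : List String) : Prop :=
  ∀ y, S.contains y = true ↔ (y ∈ p ∧ (c0.contains y = false ∨ c0.getD y 0 < k))

lemma capOf_pos (k : Int) : 1 ≤ capOf k := by unfold capOf; split <;> omega

lemma getD_cOf (c0 : PySem.Dict String Int) (p : List String) (y : String) :
    (cOf c0 p).getD y 0 = c0.getD y 0 + (if y ∈ p then 1 else 0) := by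
  have h : cOf c0 p = List.foldl (fun d x => d.insert x (d.getD x 0 + 1)) c0 (PySem.Set.ofList p) := rfl
  rw [h, PySem.Dict.getD_foldl_insert_add_one]
  by_cases hy : y ∈ p
  · have hm : y ∈ PySem.Set.ofList p := (PySem.Set.mem_ofList p y).mpr hy
    have h1 : List.count y (PySem.Set.ofList p) = 1 :=
      List.count_eq_one_of_mem (PySem.Set.nodup_ofList p) hm
    simp [hy]
  · have h0 : List.count y (PySem.Set.ofList p) = 0 :=
      List.count_eq_zero.mpr (fun hm => hy ((PySem.Set.mem_ofList p y).mp hm))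
    simp [h0, hy]

lemma mem_keys_cOf (c0 : PySem.Dict String Int) (p : List String) (y : String) :
    y ∈ (cOf c0 p).keys ↔ (y ∈ c0.keys ∨ y ∈ p) := by
  have h : cOf c0 p = List.foldl (fun d x => d.insert x ((fun (d : PySem.Dict String Int) (x : String) => d.getD x 0 + 1) d x)) c0 (PySem.Set.ofList p) := rfl
  rw [h, PySem.Dict.keys_foldl_insert]
  rw [PySem.Set.mem_update]
  simp [PySem.Set.mem_ofList]

lemma cOf_append_singleton (c0 : PySem.Dict String Int) (p : List String) (x : String) :
    cOf c0 (p ++ [x]) = if x ∈ p then cOf c0 p else stepB (cOf c0 p) x := by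
  unfold cOf
  rw [PySem.Set.ofList_append_singleton]
  by_cases h : x ∈ p
  · rw [PySem.Set.add_of_mem ((PySem.Set.mem_ofList p x).mpr h)]
    simp [h]
  · rw [PySem.Set.add_of_not_mem (fun hm => h ((PySem.Set.mem_ofList p x).mp hm)),
      List.foldl_append]
    simp [h]

-- a sum over a nodup list when the summand changes at exactly one member
lemma sum_map_update {l : List String} (hl : l.Nodup) {x : String} (hx : x ∈ l)
    (f g : String → Int) (hfg : ∀ y ∈ l, y ≠ x → f y = g y) :
    (l.map f).sum = (l.map g).sum + (f x - g x) := by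
  induction l with
  | nil => cases hx
  | cons a t ih =>
    by_cases hax : a = x
    · subst hax
      have hnt : a ∉ t := (List.nodup_cons.mp hl).1
      have ht : t.map f = t.map g :=
        List.map_congr_left (fun y hy => hfg y (List.mem_cons_of_mem _ hy)
          (fun hyx => hnt (hyx ▸ hy)))
      simp [ht]; ring
    · have hxt : x ∈ t := by
        rcases List.mem_cons.mp hx with h | h
        · exact absurd h.symm hax
        · exact h
      have hfa : f a = g a := hfg a (List.mem_cons_self) hax
      have := ih (List.nodup_cons.mp hl).2 hxt
        (fun y hy hyx => hfg y (List.mem_cons_of_mem _ hy) hyx)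
      simp [hfa, this]; ring

lemma step_preserved (k : Int) (c0 : PySem.Dict String Int)
    (hv0 : ∀ x ∈ c0.keys, 1 ≤ c0.getD x 0)
    (p : List String) (x : String) (ans : Int) (b : PySem.Dict String Int) (S : PySem.Set String)
    (hInv : CInv k (cOf c0 p) ans b) (hS : Schar k c0 S p) :
    CInv k (cOf c0 (p ++ [x])) (stepA k (ans, b, S) x).1 (stepA k (ans, b, S) x).2.1 ∧
    Schar k c0 (stepA k (ans, b, S) x).2.2 (p ++ [x]) := by
  obtain ⟨hbk, hnd, hbg, hv, hans⟩ := hInv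
  have hcap := capOf_pos k
  have hcontb : ∀ y, b.contains y = true ↔ (y ∈ c0.keys ∨ y ∈ p) := by
    intro y
    rw [PySem.Dict.contains_iff_mem_keys, hbk, mem_keys_cOf]
  have hmemS : ∀ y, y ∈ S ↔ (y ∈ p ∧ (c0.contains y = false ∨ c0.getD y 0 < k)) :=
    fun y => ((PySem.Set.contains_iff S y).symm).trans (hS y)
  by_cases hx1 : x ∈ p
  · -- second or later occurrence of x in this line: A skips, B's counts unchanged
    have hc' : cOf c0 (p ++ [x]) = cOf c0 p := by rw [cOf_append_singleton]; simp [hx1]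
    have hbx : b.contains x = true := (hcontb x).mpr (Or.inr hx1)
    have hskip : stepA k (ans, b, S) x = (ans, b, S) := by
      unfold stepA
      by_cases hsx : S.contains x = true
      · simp [hbx]
        exact fun _ => (PySem.Set.contains_iff S x).mp hsx
      · have hsx' : ¬ x ∈ S := fun hm => hsx ((PySem.Set.contains_iff S x).mpr hm)
        have hPx : ¬ (c0.contains x = false ∨ c0.getD x 0 < k) :=
          fun h => hsx' ((hmemS x).mpr ⟨hx1, h⟩)
        rw [not_or] at hPx
        obtain ⟨hc0x, hge⟩ := hPx
        rw [Int.not_lt] at hge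
        have hc0x' : c0.contains x = true := by
          cases h : c0.contains x
          · exact absurd h hc0x
          · rfl
        have hxk : x ∈ c0.keys := (PySem.Dict.contains_iff_mem_keys _ _).mp hc0x'
        have hv0x := hv0 x hxk
        have hbxv : b.getD x 0 = min (capOf k) (c0.getD x 0 + 1) := by
          rw [hbg, getD_cOf]; simp [hx1]
        have hnlt : ¬ (b.getD x 0 < k) := by rw [hbxv]; unfold capOf; split <;> omega
        simp [hbx, hnlt]
    rw [hskip, hc']
    refine ⟨⟨hbk, hnd, hbg, hv, hans⟩, ?_⟩
    intro y
    rw [hS y]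
    constructor
    · rintro ⟨hyp, hP⟩; exact ⟨List.mem_append_left _ hyp, hP⟩
    · rintro ⟨hyp, hP⟩
      rcases List.mem_append.mp hyp with h | h
      · exact ⟨h, hP⟩
      · have : y = x := List.mem_singleton.mp h
        exact ⟨this ▸ hx1, hP⟩
  · -- first occurrence of x in this line
    have hc' : cOf c0 (p ++ [x]) = (cOf c0 p).insert x ((cOf c0 p).getD x 0 + 1) := by
      rw [cOf_append_singleton]; simp [hx1, stepB]
    have hgx : (cOf c0 p).getD x 0 = c0.getD x 0 := by rw [getD_cOf]; simp [hx1]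
    by_cases hx0 : x ∈ c0.keys
    · -- token already on the board from a previous line
      have hv0x := hv0 x hx0
      have hbx : b.contains x = true := (hcontb x).mpr (Or.inl hx0)
      have hcx : (cOf c0 p).contains x = true :=
        (PySem.Dict.contains_iff_mem_keys _ _).mpr ((mem_keys_cOf c0 p x).mpr (Or.inl hx0))
      have hc0x : c0.contains x = true := (PySem.Dict.contains_iff_mem_keys _ _).mpr hx0
      have hsx : S.contains x = false := by
        cases h : S.contains x
        · rfl
        · exact absurd (((hmemS x).mp ((PySem.Set.contains_iff S x).mp h)).1) hx1
      have hkeys' : ((cOf c0 p).insert x ((cOf c0 p).getD x 0 + 1)).keys = (cOf c0 p).keys :=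
        PySem.Dict.keys_insert_of_contains _ _ hcx
      have hbxv : b.getD x 0 = min (capOf k) (c0.getD x 0) := by rw [hbg, hgx]
      have hxkeys : x ∈ (cOf c0 p).keys := (mem_keys_cOf c0 p x).mpr (Or.inl hx0)
      by_cases hlt : c0.getD x 0 < k
      · -- below the cap: A increments the board and the answer
        have hklarge : 1 < k := by omega
        have hcapk : capOf k = k := by unfold capOf; simp [hklarge]
        have hbmin : b.getD x 0 = c0.getD x 0 := by rw [hbxv, hcapk]; omega
        have hcond : b.getD x 0 < k := by omega
        have hstep : stepA k (ans, b, S) x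
            = (ans + 1, b.insert x (b.getD x 0 + 1), S.add x) := by
          have hxS : x ∉ S := fun hm => by
            have h := (PySem.Set.contains_iff S x).mpr hm
            rw [h] at hsx
            exact Bool.noConfusion hsx
          unfold stepA; simp [hbx, hcond, hxS]
        rw [hstep, hc']
        refine ⟨⟨?_, ?_, ?_, ?_, ?_⟩, ?_⟩
        · rw [PySem.Dict.keys_insert_of_contains _ _ hbx, hbk, hkeys']
        · rw [hkeys']; exact hnd
        · intro y
          by_cases hyx : y = x
          · subst hyx
            rw [PySem.Dict.getD_insert, PySem.Dict.getD_insert]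
            simp [hbmin, hgx, hcapk]
            omega
          · rw [PySem.Dict.getD_insert_of_ne _ _ _ hyx, PySem.Dict.getD_insert_of_ne _ _ _ hyx]
            exact hbg y
        · intro y hy
          rw [hkeys'] at hy
          by_cases hyx : y = x
          · subst hyx; rw [PySem.Dict.getD_insert]; simp; omega
          · rw [PySem.Dict.getD_insert_of_ne _ _ _ hyx]; exact hv y hy
        · rw [hkeys']
          have hsum := sum_map_update hnd hxkeys
            (fun y => min (capOf k) (((cOf c0 p).insert x ((cOf c0 p).getD x 0 + 1)).getD y 0))
            (fun y => min (capOf k) ((cOf c0 p).getD y 0))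
            (fun y _ hyx => by simp [PySem.Dict.getD_insert_of_ne _ _ _ hyx])
          rw [hsum, ← hans]
          show ans + 1 = ans + (min (capOf k) (((cOf c0 p).insert x ((cOf c0 p).getD x 0 + 1)).getD x 0)
            - min (capOf k) ((cOf c0 p).getD x 0))
          rw [PySem.Dict.getD_insert]
          simp [hgx, hcapk]
          omega
        · intro y
          rw [PySem.Set.contains_iff, PySem.Set.mem_add, hmemS y]
          constructor
          · rintro (⟨hyp, hP⟩ | rfl)
            · exact ⟨List.mem_append_left _ hyp, hP⟩
            · exact ⟨List.mem_append_right _ (List.mem_singleton_self _), Or.inr hlt⟩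
          · rintro ⟨hyp, hP⟩
            rcases List.mem_append.mp hyp with h | h
            · exact Or.inl ⟨h, hP⟩
            · exact Or.inr (List.mem_singleton.mp h)
      · -- at or above the cap: A skips; B still counts, but the capped value is unchanged
        have hnlt : ¬ (b.getD x 0 < k) := by rw [hbxv]; unfold capOf; split <;> omega
        have hge : ¬ (c0.getD x 0 < k) := by
          intro h
          apply hnlt
          rw [hbxv]; unfold capOf; split <;> omega
        have hstep : stepA k (ans, b, S) x = (ans, b, S) := by
          unfold stepA; simp [hbx, hnlt]
        rw [hstep, hc']
        have hgd' : ∀ y, min (capOf k) (((cOf c0 p).insert x ((cOf c0 p).getD x 0 + 1)).getD y 0)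
            = min (capOf k) ((cOf c0 p).getD y 0) := by
          intro y
          by_cases hyx : y = x
          · subst hyx
            rw [PySem.Dict.getD_insert]
            simp [hgx]
            unfold capOf; split <;> omega
          · rw [PySem.Dict.getD_insert_of_ne _ _ _ hyx]
        refine ⟨⟨?_, ?_, ?_, ?_, ?_⟩, ?_⟩
        · rw [hbk, hkeys']
        · rw [hkeys']; exact hnd
        · intro y; rw [hgd' y]; exact hbg y
        · intro y hy
          rw [hkeys'] at hy
          by_cases hyx : y = x
          · subst hyx; rw [PySem.Dict.getD_insert]; simp; omega
          · rw [PySem.Dict.getD_insert_of_ne _ _ _ hyx]; exact hv y hy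
        · rw [hkeys', hans]
          exact (congrArg List.sum (List.map_congr_left (fun y _ => hgd' y))).symm
        · intro y
          rw [hS y]
          constructor
          · rintro ⟨hyp, hP⟩; exact ⟨List.mem_append_left _ hyp, hP⟩
          · rintro ⟨hyp, hP⟩
            rcases List.mem_append.mp hyp with h | h
            · exact ⟨h, hP⟩
            · have hyx : y = x := List.mem_singleton.mp h
              subst hyx
              rcases hP with h' | h'
              · rw [hc0x] at h'; cases h'
              · exact absurd h' hge
    · -- brand-new token: A inserts it with value 1, B starts its count at 1
      have hc0x : c0.contains x = false := by
        cases h : c0.contains x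
        · rfl
        · exact absurd ((PySem.Dict.contains_iff_mem_keys _ _).mp h) hx0
      have hbxf : b.contains x = false := by
        cases h : b.contains x
        · rfl
        · rcases (hcontb x).mp h with h' | h' <;> [exact absurd h' hx0; exact absurd h' hx1]
      have hcxf : (cOf c0 p).contains x = false := by
        cases h : (cOf c0 p).contains x
        · rfl
        · rcases (mem_keys_cOf c0 p x).mp ((PySem.Dict.contains_iff_mem_keys _ _).mp h)
            with h' | h' <;> [exact absurd h' hx0; exact absurd h' hx1]
      have hg0 : c0.getD x 0 = 0 := PySem.Dict.getD_of_not_contains c0 0 hc0x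
      have hxnk : x ∉ (cOf c0 p).keys := fun hm => by
        rcases (mem_keys_cOf c0 p x).mp hm with h' | h'
        · exact hx0 h'
        · exact hx1 h'
      have hstep : stepA k (ans, b, S) x = (ans + 1, b.insert x 1, S.add x) := by
        unfold stepA; simp [hbxf]
      have hc'' : cOf c0 (p ++ [x]) = (cOf c0 p).insert x 1 := by
        rw [hc', hgx, hg0]; norm_num
      rw [hstep, hc'']
      refine ⟨⟨?_, ?_, ?_, ?_, ?_⟩, ?_⟩
      · rw [PySem.Dict.keys_insert_of_not_contains _ _ hbxf,
          PySem.Dict.keys_insert_of_not_contains _ _ hcxf, hbk]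
      · exact PySem.Dict.nodup_keys_insert _ _ _ hnd
      · intro y
        by_cases hyx : y = x
        · subst hyx
          rw [PySem.Dict.getD_insert, PySem.Dict.getD_insert]
          simp
          omega
        · rw [PySem.Dict.getD_insert_of_ne _ _ _ hyx, PySem.Dict.getD_insert_of_ne _ _ _ hyx]
          exact hbg y
      · intro y hy
        rw [PySem.Dict.keys_insert_of_not_contains _ _ hcxf] at hy
        by_cases hyx : y = x
        · subst hyx; rw [PySem.Dict.getD_insert]; simp
        · rw [PySem.Dict.getD_insert_of_ne _ _ _ hyx]
          rcases List.mem_append.mp hy with h | h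
          · exact hv y h
          · exact absurd (List.mem_singleton.mp h) hyx
      · rw [PySem.Dict.keys_insert_of_not_contains _ _ hcxf, List.map_append, List.sum_append]
        have hcong : ((cOf c0 p).keys.map
              (fun y => min (capOf k) (((cOf c0 p).insert x 1).getD y 0)))
            = ((cOf c0 p).keys.map (fun y => min (capOf k) ((cOf c0 p).getD y 0))) :=
          List.map_congr_left (fun y hy => by
            rw [PySem.Dict.getD_insert_of_ne _ _ _ (fun hyx => hxnk (by rw [← hyx]; exact hy))])
        rw [hcong, ← hans]
        simp [PySem.Dict.getD_insert]
        omega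
      · intro y
        rw [PySem.Set.contains_iff, PySem.Set.mem_add, hmemS y]
        constructor
        · rintro (⟨hyp, hP⟩ | rfl)
          · exact ⟨List.mem_append_left _ hyp, hP⟩
          · exact ⟨List.mem_append_right _ (List.mem_singleton_self _), Or.inl hc0x⟩
        · rintro ⟨hyp, hP⟩
          rcases List.mem_append.mp hyp with h | h
          · exact Or.inl ⟨h, hP⟩
          · exact Or.inr (List.mem_singleton.mp h)

lemma inner_preserved (k : Int) (c0 : PySem.Dict String Int)
    (hv0 : ∀ x ∈ c0.keys, 1 ≤ c0.getD x 0) :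
    ∀ (rest p : List String) (ans : Int) (b : PySem.Dict String Int) (S : PySem.Set String),
      CInv k (cOf c0 p) ans b → Schar k c0 S p →
      CInv k (cOf c0 (p ++ rest)) ((rest.foldl (stepA k) (ans, b, S)).1)
        ((rest.foldl (stepA k) (ans, b, S)).2.1) := by
  intro rest
  induction rest with
  | nil => intro p ans b S hI _; simpa using hI
  | cons x rest ih =>
    intro p ans b S hI hSc
    have hstep := step_preserved k c0 hv0 p x ans b S hI hSc
    have hfold : (x :: rest).foldl (stepA k) (ans, b, S)
        = rest.foldl (stepA k) ((stepA k (ans, b, S) x).1,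
            (stepA k (ans, b, S) x).2.1, (stepA k (ans, b, S) x).2.2) := by
      simp [List.foldl_cons]
    rw [hfold, List.append_cons]
    exact ih (p ++ [x]) _ _ _ hstep.1 hstep.2

lemma outer_preserved (k : Int) :
    ∀ (lines : List String) (c : PySem.Dict String Int) (ans : Int) (b : PySem.Dict String Int),
      CInv k c ans b →
      CInv k (lines.foldl lineB c) ((lines.foldl (lineA k) (ans, b)).1)
        ((lines.foldl (lineA k) (ans, b)).2) := by
  intro lines
  induction lines with
  | nil => intro c ans b hI; simpa using hI
  | cons line lines ih =>
    intro c ans b hI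
    have hnd : c.keys.Nodup := hI.2.1
    have hv : ∀ x ∈ c.keys, 1 ≤ c.getD x 0 := hI.2.2.2.1
    have hS0 : Schar k c (PySem.Set.empty) [] := by
      intro y
      constructor
      · intro h
        exact absurd ((PySem.Set.contains_iff _ y).mp h) (by simp [PySem.Set.empty])
      · intro h; exact absurd h.1 (List.not_mem_nil)
    have hI0 : CInv k (cOf c []) ans b := hI
    have := inner_preserved k c hv ((PySem.Str.split₀ line)) [] ans b PySem.Set.empty hI0 hS0
    rw [List.nil_append] at this
    have hline : lineA k (ans, b) line
        = (((PySem.Str.split₀ line).foldl (stepA k) (ans, b, PySem.Set.empty)).1,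
           ((PySem.Str.split₀ line).foldl (stepA k) (ans, b, PySem.Set.empty)).2.1) := rfl
    simp only [List.foldl_cons, hline]
    exact ih _ _ _ this

-- ===== VERDICT (by name: the statement is the Claim_ definition above) =====
theorem solution_spec : Claim_equal_solution := by
  unfold Claim_equal_solution
  intro id_list k _
  unfold Spec_solution solution solution_alt
  have hbase : CInv k PySem.Dict.empty 0 PySem.Dict.empty := by
    refine ⟨rfl, by simp [PySem.Dict.keys_empty], ?_, ?_, by simp [PySem.Dict.keys_empty]⟩
    · intro x
      have : (1:Int) ≤ capOf k := capOf_pos k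
      simp [PySem.Dict.getD_empty]
      omega
    · intro x hx; simp [PySem.Dict.keys_empty] at hx
  have h := outer_preserved k id_list PySem.Dict.empty 0 PySem.Dict.empty hbase
  obtain ⟨hbk, hnd, hbg, hv, hans⟩ := h
  rw [hans]
  have hvals := PySem.Dict.values_eq_map_keys (id_list.foldl lineB PySem.Dict.empty) hnd (0 : Int)
  show _ = (List.map (fun c => min (if 1 < k then k else 1) c)
      (id_list.foldl lineB PySem.Dict.empty).values).sum
  rw [hvals, List.map_map]
  rfl
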